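-- pv_equiv track=rewrite | github.com/flamurih/Sudoku-Validator | sudokuValidator.py | isInRange
-- ===== SOURCE A (Python) =====
-- def isInRange(grid):
--     N = 9
--
--     for i in range(0,N):
--         for j in range(0,N):
--             if((grid[i][j] <= 0) or
--                 (grid[i][j] > 9)):
--                 return False
--     return True
-- ===== SOURCE B (Python) =====
-- def isInRange(grid):
--     def rowOk(row, j):
--         return j == 9 or (1 <= row[j] <= 9 and rowOk(row, j + 1))
--
--     def rowsOk(i):
--         return i == 9 or (rowOk(grid[i], 0) and rowsOk(i + 1))
--
--     return rowsOk(0)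
-- ===== Notes on version B (the rewrite author's own statement) =====
-- stated objective: alternative
-- what changed: Replaces A's nested for-loops with early 'return False' by two short-circuiting recursive predicates: rowOk(row, j) checks one row from index j onward with a chained comparison, rowsOk(i) conjoins the rows, each terminating via 'index == 9 or ...'.
import Mathlib
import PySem

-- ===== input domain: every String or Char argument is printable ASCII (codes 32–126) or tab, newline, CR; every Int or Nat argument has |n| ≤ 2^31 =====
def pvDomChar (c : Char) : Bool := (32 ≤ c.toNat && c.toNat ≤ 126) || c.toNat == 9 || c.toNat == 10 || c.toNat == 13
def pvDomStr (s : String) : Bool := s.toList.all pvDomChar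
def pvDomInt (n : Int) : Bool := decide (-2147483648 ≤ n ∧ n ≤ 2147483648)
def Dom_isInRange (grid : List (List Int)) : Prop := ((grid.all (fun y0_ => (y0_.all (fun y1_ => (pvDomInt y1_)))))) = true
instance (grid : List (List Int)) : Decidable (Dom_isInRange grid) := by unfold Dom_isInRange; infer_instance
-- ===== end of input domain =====

-- B replaces A's nested for-loops (early 'return False') by two short-circuiting
-- recursive predicates over the same cells in the same order; return-value equivalence.

-- ===== PORT A =====
-- Nested 'for i/for j' loops with early 'return False' on a bad cell, ported as
-- nested List.all over range(0,9) (early exit = Bool short-circuit of all).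
-- grid[i][j] is ported with pyGetD defaults 0/[]: a missing cell yields 0, which
-- fails the range test exactly where Python either raised IndexError (excluded by
-- Pre_) or had already returned False at an earlier bad cell (same value False).
def isInRange (grid : List (List Int)) : Bool :=
  (PySem.List.pyRange 0 9 1).all (fun i =>
    (PySem.List.pyRange 0 9 1).all (fun j =>
      !(decide ((PySem.List.pyGetD (PySem.List.pyGetD grid i []) j 0) ≤ 0) ||
        decide ((PySem.List.pyGetD (PySem.List.pyGetD grid i []) j 0) > 9))))

-- ===== PORT B =====
-- rowOk(row, j) = 'j == 9 or (1 <= row[j] <= 9 and rowOk(row, j+1))'; the index j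
-- is carried as a Nat (it only ever takes 0..9) and 'if 9 ≤ j' totalises the
-- recursion (Python only ever reaches j == 9 exactly); row[j] via pyGetD as in port A.
def pvRowOk (row : List Int) (j : Nat) : Bool :=
  if 9 ≤ j then true
  else (decide (1 ≤ PySem.List.pyGetD row (j : Int) 0) &&
        decide (PySem.List.pyGetD row (j : Int) 0 ≤ 9)) && pvRowOk row (j + 1)
termination_by 9 - j

-- rowsOk(i) = 'i == 9 or (rowOk(grid[i], 0) and rowsOk(i+1))'
def pvRowsOk (grid : List (List Int)) (i : Nat) : Bool :=
  if 9 ≤ i then true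
  else pvRowOk (PySem.List.pyGetD grid (i : Int) []) 0 && pvRowsOk grid (i + 1)
termination_by 9 - i

def isInRange_alt (grid : List (List Int)) : Bool := pvRowsOk grid 0

-- ===== PRECONDITION & SPEC =====
-- cell k of the row-major scan, as Python's grid[k//9][k%9]: none = IndexError
def pvCell? (grid : List (List Int)) (k : Nat) : Option Int :=
  (grid[k / 9]?).bind (fun r => r[k % 9]?)
-- cell k exists and holds a value in 1..9 (the test that lets the scan continue)
def pvCellOk (grid : List (List Int)) (k : Nat) : Bool :=
  match pvCell? grid k with
  | some c => decide (1 ≤ c ∧ c ≤ 9)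
  | none => false
-- Pre_ excludes exactly the grids on which the row-major scan reaches a missing cell
-- before any out-of-range cell: there Python (both A and B) raises IndexError.
def Pre_isInRange (grid : List (List Int)) : Prop :=
  ∀ k, k < 81 → (∀ k', k' < k → pvCellOk grid k' = true) → (pvCell? grid k).isSome
instance (grid : List (List Int)) : Decidable (Pre_isInRange grid) := by unfold Pre_isInRange; infer_instance
def pvWitness_isInRange : List (List Int) :=
  [[1,2,3,4,5,6,7,8,9],[1,2,3,4,5,6,7,8,9],[1,2,3,4,5,6,7,8,9],
   [1,2,3,4,5,6,7,8,9],[1,2,3,4,5,6,7,8,9],[1,2,3,4,5,6,7,8,9],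
   [1,2,3,4,5,6,7,8,9],[1,2,3,4,5,6,7,8,9],[1,2,3,4,5,6,7,8,9]]
def Spec_isInRange (grid : List (List Int)) (out : Bool) : Prop := out = isInRange_alt grid
instance (grid : List (List Int)) (out : Bool) : Decidable (Spec_isInRange grid out) := by unfold Spec_isInRange; infer_instance

-- ===== CLAIM (what is proved, stated in full; the proofs are below) =====
def Claim_equal_isInRange : Prop := ∀ (grid : List (List Int)), Dom_isInRange grid → Pre_isInRange grid → Spec_isInRange grid (isInRange grid)

-- ===== LEMMAS AND PROOFS =====

-- the two disjuncts of A's bad-cell test are the negations of B's chained comparison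
theorem pvT1 (v : Int) : (decide (1 ≤ v)) = (!decide (v ≤ 0)) := by
  rw [Bool.eq_iff_iff]; simp only [Bool.not_eq_true', decide_eq_false_iff_not, decide_eq_true_eq]; omega
theorem pvT2 (v : Int) : (decide (v ≤ 9)) = (!decide (9 < v)) := by
  rw [Bool.eq_iff_iff]; simp only [Bool.not_eq_true', decide_eq_false_iff_not, decide_eq_true_eq]; omega

theorem pvRowOk_eq (row : List Int) :
    pvRowOk row 0 = (PySem.List.pyRange 0 9 1).all (fun j =>
      !(decide ((PySem.List.pyGetD row j 0) ≤ 0) ||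
        decide ((PySem.List.pyGetD row j 0) > 9))) := by
  simp [pvRowOk, pvT1, pvT2, show PySem.List.pyRange 0 9 1 = [0,1,2,3,4,5,6,7,8] from by decide,
    Bool.and_assoc]

theorem pvPorts_eq (grid : List (List Int)) : isInRange grid = isInRange_alt grid := by
  simp [isInRange, isInRange_alt, pvRowsOk, pvRowOk_eq,
    show PySem.List.pyRange 0 9 1 = [0,1,2,3,4,5,6,7,8] from by decide, Bool.and_assoc]

-- ===== VERDICT (by name: the statement is the Claim_ definition above) =====
theorem isInRange_spec : Claim_equal_isInRange := by
  intro grid _hdom _hpre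
  exact pvPorts_eq grid
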